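-- pv_equiv track=rewrite | github.com/Jay-omnibio/Pick_Place | tools/run_batch_eval.py | _max_consecutive_phase_rows
-- ===== SOURCE A (Python) =====
-- from typing import Dict, List, Optional, Tuple
--
-- def _max_consecutive_phase_rows(rows: List[dict], phase: str) -> int:
--     best = 0
--     cur = 0
--     for r in rows:
--         if str(r.get("phase", "")) == phase:
--             cur += 1
--             if cur > best:
--                 best = cur
--         else:
--             cur = 0
--     return best
-- ===== SOURCE B (Python) =====
-- from itertools import groupby
-- from typing import Dict, List, Optional, Tuple
--
-- def _max_consecutive_phase_rows(rows: List[dict], phase: str) -> int: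
--     matches = (str(r.get("phase", "")) == phase for r in rows)
--     return max((sum(1 for _ in g) for k, g in groupby(matches) if k), default=0)
-- ===== Notes on version B (the rewrite author's own statement) =====
-- stated objective: alternative
-- what changed: Replaces the running counter with explicit resets by a groupby decomposition: map rows to a boolean match sequence, group consecutive equal values, and take the max length of the True groups (default 0).
import Mathlib
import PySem

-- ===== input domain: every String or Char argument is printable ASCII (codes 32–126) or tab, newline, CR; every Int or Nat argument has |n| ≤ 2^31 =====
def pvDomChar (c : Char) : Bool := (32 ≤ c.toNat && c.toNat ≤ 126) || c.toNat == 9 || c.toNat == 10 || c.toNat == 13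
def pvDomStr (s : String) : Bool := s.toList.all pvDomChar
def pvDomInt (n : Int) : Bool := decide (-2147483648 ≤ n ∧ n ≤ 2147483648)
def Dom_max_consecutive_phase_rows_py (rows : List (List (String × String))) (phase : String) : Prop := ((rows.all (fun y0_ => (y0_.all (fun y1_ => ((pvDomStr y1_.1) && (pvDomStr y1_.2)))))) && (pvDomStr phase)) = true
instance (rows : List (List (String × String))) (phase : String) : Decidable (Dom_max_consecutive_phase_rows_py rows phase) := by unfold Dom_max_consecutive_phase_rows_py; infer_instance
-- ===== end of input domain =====

-- B differs from A only in decomposition (groupby over a boolean sequence vs a running counter); same O(n) cost.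

-- ===== PORT A =====
-- A: single pass keeping (best, cur); cur increments on a match and resets to 0 otherwise.
-- str(...) applied to a dict value that is already a string is the identity, so the test is plain string equality.
def max_consecutive_phase_rows_py (rows : List (List (String × String))) (phase : String) : Int :=
  (rows.foldl
    (fun (st : Int × Int) r =>
      if (PySem.Dict.getD (PySem.Dict.mk r) "phase" "") == phase then
        let cur := st.2 + 1
        let best := if cur > st.1 then cur else st.1
        (best, cur)
      else (st.1, 0))
    (0, 0)).1

-- ===== PORT B =====
-- itertools.groupby on a Bool sequence: peel off one maximal run of equal values at a time.
def pvGroupRuns : List Bool → List (Bool × Int)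
  | [] => []
  | b :: t =>
    (b, 1 + (t.takeWhile (· == b)).length) :: pvGroupRuns (t.dropWhile (· == b))
termination_by l => l.length
decreasing_by
  simp only [List.length_cons]
  exact Nat.lt_succ_of_le (List.length_dropWhile_le _ _)

-- max((len g for k, g in groupby(matches) if k), default=0)
def max_consecutive_phase_rows_py_alt (rows : List (List (String × String))) (phase : String) : Int :=
  let ms := rows.map (fun r => (PySem.Dict.getD (PySem.Dict.mk r) "phase" "") == phase)
  (pvGroupRuns ms).foldl (fun acc kg => if kg.1 then max acc kg.2 else acc) 0

-- ===== PRECONDITION & SPEC =====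
def Spec_max_consecutive_phase_rows_py (rows : List (List (String × String))) (phase : String) (out : Int) : Prop := out = max_consecutive_phase_rows_py_alt rows phase
instance (rows : List (List (String × String))) (phase : String) (out : Int) : Decidable (Spec_max_consecutive_phase_rows_py rows phase out) := by unfold Spec_max_consecutive_phase_rows_py; infer_instance

-- ===== CLAIM (what is proved, stated in full; the proofs are below) =====
def Claim_equal_max_consecutive_phase_rows_py : Prop := ∀ (rows : List (List (String × String))) (phase : String), Dom_max_consecutive_phase_rows_py rows phase → Spec_max_consecutive_phase_rows_py rows phase (max_consecutive_phase_rows_py rows phase)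

-- ===== LEMMAS AND PROOFS =====

-- Specification helpers on the boolean match sequence:
-- pvPref bs = length of the longest all-true prefix; pvMrun bs = length of the longest run of true.
def pvPref : List Bool → Int
  | [] => 0
  | true :: t => 1 + pvPref t
  | false :: _ => 0

def pvMrun : List Bool → Int
  | [] => 0
  | true :: t => max (1 + pvPref t) (pvMrun t)
  | false :: t => pvMrun t

theorem pvPref_nonneg (bs : List Bool) : 0 ≤ pvPref bs := by
  induction bs with
  | nil => simp [pvPref]
  | cons b t ih => cases b <;> simp [pvPref] <;> omega

theorem pvMrun_nonneg (bs : List Bool) : 0 ≤ pvMrun bs := by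
  induction bs with
  | nil => simp [pvMrun]
  | cons b t ih =>
    cases b
    · simpa [pvMrun] using ih
    · exact le_max_of_le_right ih

theorem pvPref_le_mrun (bs : List Bool) : pvPref bs ≤ pvMrun bs := by
  induction bs with
  | nil => simp [pvPref, pvMrun]
  | cons b t ih =>
    cases b
    · simp [pvPref, pvMrun]; exact pvMrun_nonneg t
    · simp only [pvPref, pvMrun]; exact le_max_left _ _

-- A-side: the fold with carried (best, cur) computes max best (max (cur + pref) mrun).
def pvStep (st : Int × Int) (b : Bool) : Int × Int :=
  if b then
    let cur := st.2 + 1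
    let best := if cur > st.1 then cur else st.1
    (best, cur)
  else (st.1, 0)

theorem pvFoldA_eq (bs : List Bool) : ∀ best cur : Int, 0 ≤ cur → cur ≤ best →
    (bs.foldl pvStep (best, cur)).1 = max best (max (cur + pvPref bs) (pvMrun bs)) := by
  induction bs with
  | nil =>
    intro best cur h0 h1
    simp [pvPref, pvMrun]; omega
  | cons b t ih =>
    intro best cur h0 h1
    cases b
    · have hstep : pvStep (best, cur) false = (best, 0) := by simp [pvStep]
      simp only [List.foldl_cons, hstep]
      rw [ih best 0 le_rfl (by omega)]
      simp only [pvPref, pvMrun]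
      have h2 := pvPref_le_mrun t
      have h3 := pvMrun_nonneg t
      omega
    · have hstep : pvStep (best, cur) true =
          ((if cur + 1 > best then cur + 1 else best), cur + 1) := by simp [pvStep]
      simp only [List.foldl_cons, hstep]
      rw [ih _ (cur + 1) (by omega) (by split <;> omega)]
      simp only [pvPref, pvMrun]
      have h2 := pvPref_nonneg t
      have h3 := pvMrun_nonneg t
      split <;> omega

-- pvPref counted by takeWhile
theorem pvPref_takeWhile (t : List Bool) : pvPref t = ((t.takeWhile (· == true)).length : Int) := by
  induction t with
  | nil => simp [pvPref]
  | cons b t ih =>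
    cases b
    · simp [pvPref, List.takeWhile]
    · simp [pvPref, List.takeWhile, ih]; omega

-- pvMrun splits at the first maximal true run
theorem pvMrun_drop_true (t : List Bool) :
    pvMrun t = max (pvPref t) (pvMrun (t.dropWhile (· == true))) := by
  induction t with
  | nil => simp [pvPref, pvMrun]
  | cons b t ih =>
    cases b
    · rw [List.dropWhile_cons_of_neg (by simp)]
      simp only [pvPref, pvMrun]
      exact (max_eq_right (pvMrun_nonneg t)).symm
    · rw [List.dropWhile_cons_of_pos (by simp)]
      simp only [pvPref, pvMrun]
      rw [ih]
      have h1 := pvPref_le_mrun (t.dropWhile (· == true))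
      have h2 := pvPref_nonneg t
      omega

-- pvMrun ignores leading falses
theorem pvMrun_drop_false (t : List Bool) :
    pvMrun (t.dropWhile (· == false)) = pvMrun t := by
  induction t with
  | nil => simp
  | cons b t ih =>
    cases b
    · simpa [List.dropWhile, pvMrun] using ih
    · simp [List.dropWhile, pvMrun]

-- B-side: right-fold characterisation of the group maximum
def pvMr : List (Bool × Int) → Int
  | [] => 0
  | (k, n) :: t => if k then max n (pvMr t) else pvMr t

theorem pvFoldB_max (rs : List (Bool × Int)) : ∀ acc : Int, 0 ≤ acc →
    rs.foldl (fun acc kg => if kg.1 then max acc kg.2 else acc) acc = max acc (pvMr rs) := by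
  induction rs with
  | nil => intro acc h; simp [pvMr]; omega
  | cons p t ih =>
    intro acc h
    obtain ⟨k, n⟩ := p
    cases k
    · simp only [List.foldl_cons, pvMr, if_neg (by simp : ¬ (false = true))]
      exact ih acc h
    · simp only [List.foldl_cons, pvMr, eq_self_iff_true, if_true]
      rw [ih (max acc n) (by omega)]
      omega

theorem pvMr_groupRuns (bs : List Bool) : pvMr (pvGroupRuns bs) = pvMrun bs := by
  induction bs using pvGroupRuns.induct with
  | case1 => simp [pvGroupRuns, pvMr, pvMrun]
  | case2 b t ih =>
    cases b
    · rw [pvGroupRuns]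
      simp only [pvMr, Bool.false_eq_true, if_false]
      rw [ih, pvMrun_drop_false]
      simp only [pvMrun]
    · rw [pvGroupRuns]
      simp only [pvMr, eq_self_iff_true, if_true]
      rw [ih]
      have h1 : pvMrun (true :: t) = max (1 + pvPref t) (pvMrun t) := rfl
      have hd := pvMrun_drop_true t
      have hp := pvPref_takeWhile t
      rw [h1]
      omega

-- ===== VERDICT (by name: the statement is the Claim_ definition above) =====
theorem max_consecutive_phase_rows_py_spec : Claim_equal_max_consecutive_phase_rows_py := by
  intro rows phase _
  unfold Spec_max_consecutive_phase_rows_py max_consecutive_phase_rows_py max_consecutive_phase_rows_py_alt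
  set bs := rows.map (fun r => (PySem.Dict.getD (PySem.Dict.mk r) "phase" "") == phase) with hbs
  have hA : (rows.foldl
      (fun (st : Int × Int) r =>
        if (PySem.Dict.getD (PySem.Dict.mk r) "phase" "") == phase then
          let cur := st.2 + 1
          let best := if cur > st.1 then cur else st.1
          (best, cur)
        else (st.1, 0)) (0, 0)) = bs.foldl pvStep (0, 0) := by
    rw [hbs, List.foldl_map]
    rfl
  rw [hA, pvFoldA_eq bs 0 0 le_rfl le_rfl]
  rw [pvFoldB_max (pvGroupRuns bs) 0 le_rfl, pvMr_groupRuns]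
  have h1 := pvMrun_nonneg bs
  have h2 := pvPref_le_mrun bs
  have h3 := pvPref_nonneg bs
  omega
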